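-- pv_equiv track=rewrite | github.com/BBB101/LDMLProject | LDML.py | getYStartAndEnd
-- ===== SOURCE A (Python) =====
-- def getYStartAndEnd(img):
--     start = -1
--     end = -1
--     for i in range(len(img)):
--         row = img[i]
--         if start == -1 and not isBlankWhite(row):
--             start = i
--         elif start != -1 and isBlankWhite(row):
--             end = i
--             break
--     return start, end
--
-- def isBlankWhite(line):
--     for j in range(len(line)):
--         if line[j] != 0:
--             return False
--     return True
-- ===== SOURCE B (Python) =====
-- def isBlankWhite(line):
--     return not any(line)
--
-- def getYStartAndEnd(img):
--     blanks = [isBlankWhite(row) for row in img]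
--     if False not in blanks:
--         return -1, -1
--     start = blanks.index(False)
--     rest = blanks[start + 1:]
--     end = start + 1 + rest.index(True) if True in rest else -1
--     return start, end
-- ===== Notes on version B (the rewrite author's own statement) =====
-- stated objective: alternative
-- what changed: B first materialises a boolean blank-flag table for every row in one comprehension, then derives start and end purely from that table with membership tests, list.index and a slice, instead of A's single early-breaking state-machine scan over the rows.
import Mathlib
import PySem

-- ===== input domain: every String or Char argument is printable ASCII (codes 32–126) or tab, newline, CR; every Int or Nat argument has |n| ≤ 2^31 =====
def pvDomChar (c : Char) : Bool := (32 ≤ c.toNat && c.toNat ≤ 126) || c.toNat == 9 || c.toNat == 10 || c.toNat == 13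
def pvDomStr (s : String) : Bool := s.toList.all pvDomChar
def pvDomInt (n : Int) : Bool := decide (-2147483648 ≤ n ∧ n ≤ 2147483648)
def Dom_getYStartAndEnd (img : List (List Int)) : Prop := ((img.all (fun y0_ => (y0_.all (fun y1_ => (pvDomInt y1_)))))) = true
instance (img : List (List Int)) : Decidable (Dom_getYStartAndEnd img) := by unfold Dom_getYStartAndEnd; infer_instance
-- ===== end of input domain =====

-- B precomputes a boolean blank-flag table for every row, then reads start/end off that
-- table with membership/index/slice, instead of A's single early-breaking state-machine
-- scan (alternative decomposition, same asymptotic cost).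

-- ===== PORT A =====
-- for j in range(len(line)): if line[j] != 0: return False; return True
def isBlankWhiteA : List Int → Bool
  | [] => true
  | x :: xs => if x ≠ 0 then false else isBlankWhiteA xs

-- the for-loop with index i and state (start, end); break returns immediately
def goA : List (List Int) → Int → Int → Int → Int × Int
  | [], _, start, end_ => (start, end_)
  | row :: rest, i, start, end_ =>
    if start == -1 && !isBlankWhiteA row then goA rest (i + 1) i end_
    else if start != -1 && isBlankWhiteA row then (start, i)
    else goA rest (i + 1) start end_

def getYStartAndEnd (img : List (List Int)) : Int × Int := goA img 0 (-1) (-1)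

-- ===== PORT B =====
-- not any(line): a row is blank iff it has no truthy (non-zero) entry
def isBlankWhiteB (line : List Int) : Bool := !(line.any (· != 0))

-- blanks = [...]; `in` → contains, list.index → idxOf (membership established first),
-- blanks[start+1:] → drop (start+1), exact since start ≥ 0 here
def getYStartAndEnd_alt (img : List (List Int)) : Int × Int :=
  let blanks := img.map isBlankWhiteB
  if !(blanks.contains false) then (-1, -1)
  else
    let start := blanks.idxOf false
    let rest := blanks.drop (start + 1)
    if rest.contains true then ((start : Int), (start : Int) + 1 + (rest.idxOf true : Int))
    else ((start : Int), -1)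

-- ===== PRECONDITION & SPEC =====
def Spec_getYStartAndEnd (img : List (List Int)) (out : Int × Int) : Prop := out = getYStartAndEnd_alt img
instance (img : List (List Int)) (out : Int × Int) : Decidable (Spec_getYStartAndEnd img out) := by unfold Spec_getYStartAndEnd; infer_instance

-- ===== CLAIM (what is proved, stated in full; the proofs are below) =====
def Claim_equal_getYStartAndEnd : Prop := ∀ (img : List (List Int)), Dom_getYStartAndEnd img → Spec_getYStartAndEnd img (getYStartAndEnd img)

-- ===== LEMMAS AND PROOFS =====

theorem isBlank_eq (line : List Int) : isBlankWhiteA line = isBlankWhiteB line := by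
  induction line with
  | nil => rfl
  | cons x xs ih =>
    simp [isBlankWhiteA, isBlankWhiteB] at *
    by_cases hx : x = 0 <;> simp [hx, ih]

-- phase 2: once start = s ≠ -1, A's loop returns s paired with the absolute index of the
-- first blank row (B reads the same index off the flag table with contains/idxOf)
theorem goA_end (rows : List (List Int)) : ∀ (i s : Int), s ≠ -1 →
    goA rows i s (-1) =
      (s, if (rows.map isBlankWhiteB).contains true
          then i + ((rows.map isBlankWhiteB).idxOf true : Int) else -1) := by
  induction rows with
  | nil => intro i s hs; simp [goA]
  | cons row rest ih =>
    intro i s hs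
    by_cases hb : isBlankWhiteA row
    · have hb' : isBlankWhiteB row = true := by rw [← isBlank_eq]; exact hb
      simp [goA, hs, hb, hb']
    · have hb' : isBlankWhiteB row = false := by rw [← isBlank_eq]; simpa using hb
      simp only [goA, hb, Bool.not_false, Bool.and_true, List.map_cons]
      rw [if_neg (by simp [hs]), if_neg (by simp [hb]), ih (i + 1) s hs]
      simp [hb']
      split_ifs <;> push_cast <;> ring

theorem goA_start (rows : List (List Int)) : ∀ (i : Nat),
    goA rows (i : Int) (-1) (-1) =
      (let blanks := rows.map isBlankWhiteB
       if !(blanks.contains false) then (-1, -1)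
       else
         let start := blanks.idxOf false
         let rest := blanks.drop (start + 1)
         if rest.contains true
         then ((i + start : Int), (i + start : Int) + 1 + (rest.idxOf true : Int))
         else ((i + start : Int), -1)) := by
  induction rows with
  | nil => intro i; simp [goA]
  | cons row rest ih =>
    intro i
    by_cases hb : isBlankWhiteA row
    · have hb' : isBlankWhiteB row = true := by rw [← isBlank_eq]; exact hb
      have h1 : ((i : Int) + 1) = ((i + 1 : Nat) : Int) := by push_cast; ring
      simp only [goA, hb, Bool.not_true, Bool.and_false, List.map_cons]
      rw [if_neg (by simp), if_neg (by simp), h1, ih (i + 1)]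
      simp [hb']
      by_cases hc : ∀ x ∈ rest, isBlankWhiteB x = true
      · simp_all
      · simp [hc]
        split_ifs with he <;> simp only [Prod.mk.injEq] <;> constructor <;> push_cast <;> ring
    · have hb' : isBlankWhiteB row = false := by rw [← isBlank_eq]; simpa using hb
      have hi' : (i : Int) ≠ -1 := by omega
      simp only [goA, hb, Bool.not_false, Bool.and_true, List.map_cons]
      rw [if_pos (by simp), goA_end rest ((i : Int) + 1) (i : Int) hi']
      simp [hb']
      split_ifs  <;> push_cast <;> ring

-- ===== VERDICT (by name: the statement is the Claim_ definition above) =====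
theorem getYStartAndEnd_spec : Claim_equal_getYStartAndEnd := by
  intro img _
  unfold Spec_getYStartAndEnd getYStartAndEnd getYStartAndEnd_alt
  have h := goA_start img 0
  simpa using h
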